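-- pv_equiv track=rewrite | github.com/debayanmanna136-netizen/Movie_recommendation_system | movie_bot.py | get_genre_ids_from_input
-- ===== SOURCE A (Python) =====
-- GENRE_MAP = {
--     "action": 28,
--     "adventure": 12,
--     "animation": 16,
--     "comedy": 35,
--     "crime": 80,
--     "documentary": 99,
--     "drama": 18,
--     "family": 10751,
--     "fantasy": 14,
--     "history": 36,
--     "horror": 27,
--     "music": 10402,
--     "mystery": 9648,
--     "romance": 10749,
--     "science fiction": 878,
--     "thriller": 53,
--     "war": 10752,
--     "western": 37
-- }
--
-- def get_genre_ids_from_input(user_input):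
--     genres = user_input.lower().split("-")
--     genre_ids = []
--
--     for genre in genres:
--         if genre in GENRE_MAP:
--             genre_ids.append(str(GENRE_MAP[genre]))
--         else:
--             return ""
--
--     return ",".join(genre_ids)
-- ===== SOURCE B (Python) =====
-- GENRE_MAP = {
--     "action": 28, "adventure": 12, "animation": 16, "comedy": 35,
--     "crime": 80, "documentary": 99, "drama": 18, "family": 10751,
--     "fantasy": 14, "history": 36, "horror": 27, "music": 10402,
--     "mystery": 9648, "romance": 10749, "science fiction": 878,
--     "thriller": 53, "war": 10752, "western": 37,
-- }
--
-- def _ids(genres):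
--     """Recursively map genres to id strings; None propagates an unknown genre."""
--     if not genres:
--         return []
--     v = GENRE_MAP.get(genres[0])
--     if v is None:
--         return None
--     rest = _ids(genres[1:])
--     if rest is None:
--         return None
--     return [str(v)] + rest
--
-- def get_genre_ids_from_input(user_input):
--     ids = _ids(user_input.lower().split("-"))
--     return "" if ids is None else ",".join(ids)
-- ===== Notes on version B (the rewrite author's own statement) =====
-- stated objective: alternative
-- what changed: Replaced A's iterative accumulator loop with early return by a recursive Option-sequencing helper: each unknown genre yields None which propagates up, and the id list is built back-to-front by consing onto the recursive result, joined once at the top.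
import Mathlib
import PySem

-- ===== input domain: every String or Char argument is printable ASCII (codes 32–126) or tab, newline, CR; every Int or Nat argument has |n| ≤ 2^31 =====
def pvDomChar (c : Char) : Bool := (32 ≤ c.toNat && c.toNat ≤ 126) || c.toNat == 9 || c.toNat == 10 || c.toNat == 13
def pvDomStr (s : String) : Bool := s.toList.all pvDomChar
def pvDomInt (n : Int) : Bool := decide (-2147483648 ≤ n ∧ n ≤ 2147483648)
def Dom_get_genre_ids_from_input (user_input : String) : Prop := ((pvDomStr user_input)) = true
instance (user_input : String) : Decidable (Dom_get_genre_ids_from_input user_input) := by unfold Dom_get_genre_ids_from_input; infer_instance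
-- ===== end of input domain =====

-- B replaces A's iterative accumulator loop with early return by a recursive
-- Option-sequencing helper (None propagates an unknown genre; the id list is
-- consed onto the recursive result and joined once). Objective: alternative; same cost.

-- shared module constant
def GENRE_MAP : PySem.Dict String Int := PySem.Dict.ofList
  [("action", 28), ("adventure", 12), ("animation", 16), ("comedy", 35),
   ("crime", 80), ("documentary", 99), ("drama", 18), ("family", 10751),
   ("fantasy", 14), ("history", 36), ("horror", 27), ("music", 10402),
   ("mystery", 9648), ("romance", 10749), ("science fiction", 878),
   ("thriller", 53), ("war", 10752), ("western", 37)]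

-- ===== PORT A =====
-- A's for-loop: append str(GENRE_MAP[genre]) to the accumulator or return "" early
def getGenreGoA : List String → List String → String
  | [], acc => PySem.Str.join "," acc
  | g :: rest, acc =>
    match GENRE_MAP.get? g with
    | some v => getGenreGoA rest (acc ++ [PySem.Int.toStr v])
    | none => ""

def get_genre_ids_from_input (user_input : String) : String :=
  getGenreGoA (((PySem.Str.split? (PySem.Str.lower user_input) "-").getD [])) []

-- ===== PORT B =====
-- Source B's _ids: recursive Option-sequencing, consing str(v) onto the recursive result
def genreIdsRec : List String → Option (List String)
  | [] => some []
  | g :: rest =>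
    match GENRE_MAP.get? g with
    | none => none
    | some v =>
      match genreIdsRec rest with
      | none => none
      | some ids => some (PySem.Int.toStr v :: ids)

def get_genre_ids_from_input_alt (user_input : String) : String :=
  match genreIdsRec ((PySem.Str.split? (PySem.Str.lower user_input) "-").getD []) with
  | none => ""
  | some ids => PySem.Str.join "," ids

-- ===== PRECONDITION & SPEC =====
def Spec_get_genre_ids_from_input (user_input : String) (out : String) : Prop := out = get_genre_ids_from_input_alt user_input
instance (user_input : String) (out : String) : Decidable (Spec_get_genre_ids_from_input user_input out) := by unfold Spec_get_genre_ids_from_input; infer_instance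

-- ===== CLAIM (what is proved, stated in full; the proofs are below) =====
def Claim_equal_get_genre_ids_from_input : Prop := ∀ (user_input : String), Dom_get_genre_ids_from_input user_input → Spec_get_genre_ids_from_input user_input (get_genre_ids_from_input user_input)

-- ===== LEMMAS AND PROOFS =====
theorem getGenreGoA_eq (genres : List String) (acc : List String) :
    getGenreGoA genres acc =
      match genreIdsRec genres with
      | none => ""
      | some ids => PySem.Str.join "," (acc ++ ids) := by
  induction genres generalizing acc with
  | nil => simp [getGenreGoA, genreIdsRec]
  | cons g rest ih =>
    cases h : GENRE_MAP.get? g with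
    | none => simp [getGenreGoA, genreIdsRec, h]
    | some v =>
      simp only [getGenreGoA, genreIdsRec, h, ih]
      cases genreIdsRec rest with
      | none => rfl
      | some ids => simp

-- ===== VERDICT (by name: the statement is the Claim_ definition above) =====
theorem get_genre_ids_from_input_spec : Claim_equal_get_genre_ids_from_input := by
  intro user_input _
  unfold Spec_get_genre_ids_from_input get_genre_ids_from_input get_genre_ids_from_input_alt
  rw [getGenreGoA_eq]
  simp
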